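-- pv_equiv track=rewrite | github.com/Doyun-coding/codegadget_llm | static_extractor/normalize_gadgets_v2.py | center_crop_around_sink
-- ===== SOURCE A (Python) =====
-- def center_crop_around_sink(code: str, sinks: set[str], max_chars=2000) -> str:
--     """싱크 등장 위치를 중심으로 max_chars 크롭 (guard + sink를 함께 남기기 위함)"""
--     if len(code) <= max_chars:
--         return code
--     # 가장 앞쪽에 등장하는 싱크 오프셋 찾기
--     positions = []
--     for s in sinks:
--         idx = code.find(s + "(") if "(" not in s else code.find(s)
--         if idx >= 0:
--             positions.append(idx)
--     if not positions:
--         return code[:max_chars]  # 싱크가 없으면 앞부분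
--     center = min(positions)
--     half = max_chars // 2
--     start = max(0, center - half)
--     end = min(len(code), start + max_chars)
--     return code[start:end]
-- ===== SOURCE B (Python) =====
-- def center_crop_around_sink(code: str, sinks: set[str], max_chars=2000) -> str:
--     """One left-to-right scan probing a hash set of patterns by slice, instead of one find() pass per sink."""
--     if len(code) <= max_chars:
--         return code
--     pats = {s if "(" in s else s + "(" for s in sinks}
--     lens = {len(p) for p in pats}
--     center = None
--     for i in range(len(code)):
--         if any(code[i:i + L] in pats for L in lens):
--             center = i
--             break
--     if center is None:
--         return code[:max_chars]
--     half = max_chars // 2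
--     start = max(0, center - half)
--     end = min(len(code), start + max_chars)
--     return code[start:end]
-- ===== Notes on version B (the rewrite author's own statement) =====
-- stated objective: faster
-- what changed: Replaces the per-sink code.find() scans plus min() over collected offsets by one left-to-right scan that probes a hash set of sink patterns with code[i:i+L] for each distinct pattern length, stopping at the first hit.
import Mathlib
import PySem

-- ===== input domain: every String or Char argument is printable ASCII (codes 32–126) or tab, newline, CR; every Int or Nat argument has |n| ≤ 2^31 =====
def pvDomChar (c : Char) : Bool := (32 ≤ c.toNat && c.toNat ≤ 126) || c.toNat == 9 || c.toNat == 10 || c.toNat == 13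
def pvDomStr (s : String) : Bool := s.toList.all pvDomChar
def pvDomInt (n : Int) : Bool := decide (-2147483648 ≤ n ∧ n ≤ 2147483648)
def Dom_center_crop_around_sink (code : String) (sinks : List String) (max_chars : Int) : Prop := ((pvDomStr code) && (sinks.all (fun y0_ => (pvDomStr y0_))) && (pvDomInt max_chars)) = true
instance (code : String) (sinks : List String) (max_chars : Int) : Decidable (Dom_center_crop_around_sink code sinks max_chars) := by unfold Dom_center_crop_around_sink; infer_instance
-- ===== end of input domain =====

-- B replaces A's per-sink find() scans + min() over the collected offsets by one single
-- left-to-right scan that probes a hash set of the sink patterns with the slice code[i:i+L]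
-- for each distinct pattern length L, stopping at the first hit (same return value).

-- ===== PORT A =====
def center_crop_around_sink (code : String) (sinks : List String) (max_chars : Int) : String :=
  if (PySem.Str.len code : Int) ≤ max_chars then code
  else
    let positions : List Int := sinks.foldl (fun acc s =>
      let idx : Int :=
        if !PySem.Chars.isIn ['('] s.toList
        then PySem.Chars.find code.toList (s.toList ++ ['('])
        else PySem.Chars.find code.toList s.toList
      if 0 ≤ idx then acc ++ [idx] else acc) []
    match PySem.List.min? positions (fun x => x) with
    | none => PySem.Str.slice code none (some max_chars)
    | some center =>
      let half := PySem.Int.floordiv max_chars 2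
      let start := max 0 (center - half)
      let stop := min ((PySem.Str.len code : Int)) (start + max_chars)
      PySem.Str.slice code (some start) (some stop)

-- ===== PORT B =====
-- pattern of one sink: s if "(" in s else s + "("
def pvPat (s : String) : List Char :=
  if PySem.Chars.isIn ['('] s.toList then s.toList else s.toList ++ ['(']

-- the `for i in range(len(code)): if any(code[i:i+L] in pats for L in lens): center = i; break`
-- scan; code[i:i+L] is (List.take L) of the current suffix drop i code
def pvScanFrom (lens : PySem.Set Nat) (pats : PySem.Set (List Char)) : Nat → List Char → Option Nat
  | _, [] => none
  | i, c :: rest =>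
    if lens.any (fun L => PySem.Set.contains pats ((c :: rest).take L)) then some i
    else pvScanFrom lens pats (i + 1) rest

def center_crop_around_sink_alt (code : String) (sinks : List String) (max_chars : Int) : String :=
  if (PySem.Str.len code : Int) ≤ max_chars then code
  else
    let pats : PySem.Set (List Char) := PySem.Set.ofList (sinks.map pvPat)
    let lens : PySem.Set Nat := PySem.Set.ofList (pats.map List.length)
    match pvScanFrom lens pats 0 code.toList with
    | none => PySem.Str.slice code none (some max_chars)
    | some center =>
      let half := PySem.Int.floordiv max_chars 2
      let start := max 0 ((center : Int) - half)
      let stop := min ((PySem.Str.len code : Int)) (start + max_chars)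
      PySem.Str.slice code (some start) (some stop)

-- ===== PRECONDITION & SPEC =====
def Spec_center_crop_around_sink (code : String) (sinks : List String) (max_chars : Int) (out : String) : Prop := out = center_crop_around_sink_alt code sinks max_chars
instance (code : String) (sinks : List String) (max_chars : Int) (out : String) : Decidable (Spec_center_crop_around_sink code sinks max_chars out) := by unfold Spec_center_crop_around_sink; infer_instance

-- ===== CLAIM (what is proved, stated in full; the proofs are below) =====
def Claim_equal_center_crop_around_sink : Prop := ∀ (code : String) (sinks : List String) (max_chars : Int), Dom_center_crop_around_sink code sinks max_chars → Spec_center_crop_around_sink code sinks max_chars (center_crop_around_sink code sinks max_chars)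

-- ===== LEMMAS AND PROOFS =====

-- the scan without the first-character filter (proof helper)
def pvScanPlain (pats : List (List Char)) : Nat → List Char → Option Nat
  | _, [] => none
  | i, c :: rest =>
    if pats.any (fun p => p.isPrefixOf (c :: rest)) then some i
    else pvScanPlain pats (i + 1) rest

-- "some pattern starts at the head of this suffix"
def pvQ (pats : List (List Char)) (suf : List Char) : Prop := ∃ p ∈ pats, p <+: suf

theorem pvQ_iff_any (pats : List (List Char)) (suf : List Char) :
    pats.any (fun p => p.isPrefixOf suf) = true ↔ pvQ pats suf := by
  simp [pvQ, List.any_eq_true, List.isPrefixOf_iff_prefix]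

theorem pvPat_ne_nil (s : String) : pvPat s ≠ [] := by
  unfold pvPat
  split_ifs with h
  · intro hnil
    rw [hnil] at h
    rw [PySem.Chars.isIn_iff_infix] at h
    simp at h
  · simp

-- probing the pattern set by slice finds a hit exactly where some pattern is a prefix
theorem pvCond_iff (sinks : List String) (suf : List Char) :
    ((PySem.Set.ofList ((PySem.Set.ofList (sinks.map pvPat)).map List.length)).any
      (fun L => PySem.Set.contains (PySem.Set.ofList (sinks.map pvPat)) (suf.take L)))
    = (sinks.map pvPat).any (fun p => p.isPrefixOf suf) := by
  cases hrhs : (sinks.map pvPat).any (fun p => p.isPrefixOf suf) with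
  | true =>
    obtain ⟨p, hp, hpre'⟩ := List.any_eq_true.1 hrhs
    have hpre : p <+: suf := List.isPrefixOf_iff_prefix.1 hpre'
    rw [List.any_eq_true]
    refine ⟨p.length, ?_, ?_⟩
    · exact (PySem.Set.mem_ofList _ _).2 (List.mem_map_of_mem ((PySem.Set.mem_ofList _ _).2 hp))
    · have htake : suf.take p.length = p := (List.prefix_iff_eq_take.1 hpre).symm
      rw [htake]
      exact List.contains_iff_mem.2 ((PySem.Set.mem_ofList _ _).2 hp)
  | false =>
    rw [List.any_eq_false] at hrhs
    rw [List.any_eq_false]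
    intro L _
    intro hcont
    have hq : suf.take L ∈ sinks.map pvPat :=
      (PySem.Set.mem_ofList _ _).1 (List.contains_iff_mem.1 hcont)
    exact absurd (List.isPrefixOf_iff_prefix.2 (List.take_prefix L suf))
      (by simpa using hrhs _ hq)

theorem pvScanFrom_eq_plain (sinks : List String) :
    ∀ (cs : List Char) (k : Nat),
      pvScanFrom (PySem.Set.ofList ((PySem.Set.ofList (sinks.map pvPat)).map List.length))
        (PySem.Set.ofList (sinks.map pvPat)) k cs = pvScanPlain (sinks.map pvPat) k cs := by
  intro cs
  induction cs with
  | nil => intro k; rfl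
  | cons c rest ih =>
    intro k
    simp only [pvScanFrom, pvScanPlain, pvCond_iff sinks (c :: rest)]
    split_ifs with h
    · rfl
    · exact ih (k + 1)

theorem pvScanPlain_shift (pats : List (List Char)) :
    ∀ (cs : List Char) (k : Nat),
      pvScanPlain pats k cs = (pvScanPlain pats 0 cs).map (k + ·) := by
  intro cs
  induction cs with
  | nil => intro k; simp [pvScanPlain]
  | cons c rest ih =>
    intro k
    simp only [pvScanPlain]
    split_ifs with h
    · simp
    · rw [ih (k + 1), ih 1, Option.map_map]
      congr 1
      funext j; simp; omega

theorem pvScanPlain_none (pats : List (List Char)) :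
    ∀ (cs : List Char), pvScanPlain pats 0 cs = none →
      ∀ j, j < cs.length → ¬ pvQ pats (cs.drop j) := by
  intro cs
  induction cs with
  | nil => intro _ j hj; simp at hj
  | cons c rest ih =>
    intro h j hj
    simp only [pvScanPlain] at h
    split_ifs at h with hm
    have h0 : pvScanPlain pats 0 rest = none := by
      have h1 : (pvScanPlain pats 0 rest).map (1 + ·) = none := by
        rw [← pvScanPlain_shift]; simpa using h
      simpa using h1
    match j with
    | 0 => intro hq; exact absurd ((pvQ_iff_any _ _).2 hq) (by simp [hm])
    | j + 1 =>
      have := ih h0 j (by simpa using hj)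
      simpa using this

theorem pvScanPlain_some (pats : List (List Char)) :
    ∀ (cs : List Char) (m : Nat), pvScanPlain pats 0 cs = some m →
      pvQ pats (cs.drop m) ∧ ∀ j, j < m → ¬ pvQ pats (cs.drop j) := by
  intro cs
  induction cs with
  | nil => intro m h; simp [pvScanPlain] at h
  | cons c rest ih =>
    intro m h
    simp only [pvScanPlain] at h
    split_ifs at h with hm
    · have hm0 : m = 0 := by simpa using h.symm
      subst hm0
      exact ⟨(pvQ_iff_any _ _).1 hm, by omega⟩
    · rw [pvScanPlain_shift] at h
      cases hh : pvScanPlain pats 0 rest with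
      | none => rw [hh] at h; simp at h
      | some m' =>
        rw [hh] at h
        simp at h
        have hrec := ih m' hh
        constructor
        · have hm1 : m = m' + 1 := by omega
          subst hm1
          simpa using hrec.1
        · intro j hj
          match j with
          | 0 => intro hq; exact absurd ((pvQ_iff_any _ _).2 hq) (by simp [hm])
          | j + 1 =>
            have hj' : j < m' := by omega
            simpa using hrec.2 j hj'

-- A's positions list, written as map-of-filter (via PySem.List.foldl_append_if)
theorem positions_eq (cs : List Char) (sinks : List String) :
    (sinks.foldl (fun acc s =>
      let idx : Int :=
        if !PySem.Chars.isIn ['('] s.toList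
        then PySem.Chars.find cs (s.toList ++ ['('])
        else PySem.Chars.find cs s.toList
      if 0 ≤ idx then acc ++ [idx] else acc) [])
    = ((sinks.filter (fun s => decide (0 ≤ PySem.Chars.find cs (pvPat s)))).map
        (fun s => PySem.Chars.find cs (pvPat s))) := by
  have hfun : (fun (acc : List Int) (s : String) =>
      let idx : Int :=
        if !PySem.Chars.isIn ['('] s.toList
        then PySem.Chars.find cs (s.toList ++ ['('])
        else PySem.Chars.find cs s.toList
      if 0 ≤ idx then acc ++ [idx] else acc)
      = (fun acc s =>
          if (fun s => decide (0 ≤ PySem.Chars.find cs (pvPat s))) s = true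
          then acc ++ [(fun s => PySem.Chars.find cs (pvPat s)) s] else acc) := by
    funext acc s
    have hpat : (if !PySem.Chars.isIn ['('] s.toList
          then PySem.Chars.find cs (s.toList ++ ['('])
          else PySem.Chars.find cs s.toList) = PySem.Chars.find cs (pvPat s) := by
      unfold pvPat; by_cases h' : PySem.Chars.isIn ['('] s.toList = true <;> simp [h']
    simp only [hpat, decide_eq_true_eq]
  rw [hfun, PySem.List.foldl_append_if, List.nil_append]

-- core: min of the per-pattern first occurrences = the single scan's first hit
theorem min_eq_scan (cs : List Char) (sinks : List String) :
    PySem.List.min?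
      ((sinks.filter (fun s => decide (0 ≤ PySem.Chars.find cs (pvPat s)))).map
        (fun s => PySem.Chars.find cs (pvPat s))) (fun x => x)
    = (pvScanPlain (sinks.map pvPat) 0 cs).map (fun n => (n : Int)) := by
  cases hscan : pvScanPlain (sinks.map pvPat) 0 cs with
  | none =>
    have hnone := pvScanPlain_none _ cs hscan
    have hfil : (sinks.filter (fun s => decide (0 ≤ PySem.Chars.find cs (pvPat s)))) = [] := by
      rw [List.filter_eq_nil_iff]
      intro s hs
      simp only [decide_eq_true_eq, not_le]
      by_contra hc
      push_neg at hc
      have hin : PySem.Chars.isIn (pvPat s) cs = true := by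
        rw [PySem.Chars.isIn_iff_infix]
        exact (PySem.Chars.find_nonneg_iff _ _).1 hc
      obtain ⟨j, hj⟩ := (PySem.Chars.exists_prefix_drop_iff_isIn (pvPat s) cs).2 hin
      have hjlt : j < cs.length := by
        by_contra hge
        push_neg at hge
        have hnil : cs.drop j = [] := List.drop_eq_nil_iff.2 hge
        rw [hnil] at hj
        exact pvPat_ne_nil s (List.prefix_nil.1 hj)
      exact hnone j hjlt ⟨pvPat s, List.mem_map_of_mem hs, hj⟩
    rw [hfil]
    simp [PySem.List.min?]
  | some m =>
    obtain ⟨⟨p0, hp0mem, hp0pre⟩, hmin⟩ := pvScanPlain_some _ cs m hscan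
    obtain ⟨s0, hs0, rfl⟩ := List.mem_map.1 hp0mem
    -- the first occurrence of each listed pattern is ≥ m …
    have hge : ∀ s ∈ sinks, 0 ≤ PySem.Chars.find cs (pvPat s) →
        (m : Int) ≤ PySem.Chars.find cs (pvPat s) := by
      intro s hs hnn
      obtain ⟨hpre, _⟩ := PySem.Chars.find_spec hnn
      by_contra hlt
      push_neg at hlt
      have htlt : (PySem.Chars.find cs (pvPat s)).toNat < m := by omega
      exact hmin _ htlt ⟨pvPat s, List.mem_map_of_mem hs, hpre⟩
    -- … and s0's pattern occurs first exactly at m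
    have hnn0 : 0 ≤ PySem.Chars.find cs (pvPat s0) := by
      rw [PySem.Chars.find_nonneg_iff]
      exact hp0pre.isInfix.trans (List.drop_suffix m cs).isInfix
    have hfind0 : PySem.Chars.find cs (pvPat s0) = (m : Int) := by
      obtain ⟨_, hless⟩ := PySem.Chars.find_spec hnn0
      have h1 : (m : Int) ≤ PySem.Chars.find cs (pvPat s0) := hge s0 hs0 hnn0
      have h2 : ¬ m < (PySem.Chars.find cs (pvPat s0)).toNat := fun hlt => hless m hlt hp0pre
      omega
    have hmem : (m : Int) ∈ ((sinks.filter
        (fun s => decide (0 ≤ PySem.Chars.find cs (pvPat s)))).map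
        (fun s => PySem.Chars.find cs (pvPat s))) := by
      rw [List.mem_map]
      exact ⟨s0, List.mem_filter.2 ⟨hs0, by simp [hnn0]⟩, hfind0⟩
    cases hmq : PySem.List.min? ((sinks.filter
        (fun s => decide (0 ≤ PySem.Chars.find cs (pvPat s)))).map
        (fun s => PySem.Chars.find cs (pvPat s))) (fun x => x) with
    | none =>
      rw [PySem.List.min?_eq_none_iff] at hmq
      rw [hmq] at hmem
      simp at hmem
    | some w =>
      have hwmem := PySem.List.min?_mem hmq
      obtain ⟨sw, hswf, hweq⟩ := List.mem_map.1 hwmem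
      have hswmem := List.mem_filter.1 hswf
      have hswnn : 0 ≤ PySem.Chars.find cs (pvPat sw) := by
        have := hswmem.2; simpa using this
      have hw_ge : (m : Int) ≤ w := by
        rw [← hweq]; exact hge sw hswmem.1 hswnn
      have hw_le : w ≤ (m : Int) := PySem.List.min?_isMin hmq _ hmem
      have hwm : w = (m : Int) := le_antisymm hw_le hw_ge
      rw [hwm]
      rfl

-- ===== VERDICT (by name: the statement is the Claim_ definition above) =====
theorem center_crop_around_sink_spec : Claim_equal_center_crop_around_sink := by
  intro code sinks max_chars _
  unfold Spec_center_crop_around_sink center_crop_around_sink center_crop_around_sink_alt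
  by_cases hlen : (PySem.Str.len code : Int) ≤ max_chars
  · simp only [hlen, if_pos]
  · simp only [hlen, if_false]
    rw [pvScanFrom_eq_plain sinks code.toList 0,
      positions_eq code.toList sinks, min_eq_scan code.toList sinks]
    cases h : pvScanPlain (sinks.map pvPat) 0 code.toList <;> simp
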